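-- pv_equiv track=rewrite | github.com/bezvershenko/YandexLyceymPyGame | test.py | find_y
-- ===== SOURCE A (Python) =====
-- def find_y(d):
--     maxy = 0
--     miny = len(d)
--     for i in range(len(d[0])):
--         for j in range(len(d)):
--             if d[j][i] != 0:
--                 maxy = max(maxy, j)
--                 miny = min(miny, j)
--
--     return miny, maxy
-- ===== SOURCE B (Python) =====
-- def find_y(d):
--     w = len(d[0])
--     n = len(d)
--     miny = n
--     for j in range(n):
--         if any(d[j][i] != 0 for i in range(w)):
--             miny = j
--             break
--     maxy = 0
--     for j in range(n - 1, -1, -1):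
--         if any(d[j][i] != 0 for i in range(w)):
--             maxy = j
--             break
--     return miny, maxy
-- ===== Notes on version B (the rewrite author's own statement) =====
-- stated objective: alternative
-- what changed: A tracks min/max row index in one full column-major nested pass over every cell; B computes the column count once and does two early-breaking directional row scans (top-down for miny, bottom-up for maxy) using any() per row.
import Mathlib
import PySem

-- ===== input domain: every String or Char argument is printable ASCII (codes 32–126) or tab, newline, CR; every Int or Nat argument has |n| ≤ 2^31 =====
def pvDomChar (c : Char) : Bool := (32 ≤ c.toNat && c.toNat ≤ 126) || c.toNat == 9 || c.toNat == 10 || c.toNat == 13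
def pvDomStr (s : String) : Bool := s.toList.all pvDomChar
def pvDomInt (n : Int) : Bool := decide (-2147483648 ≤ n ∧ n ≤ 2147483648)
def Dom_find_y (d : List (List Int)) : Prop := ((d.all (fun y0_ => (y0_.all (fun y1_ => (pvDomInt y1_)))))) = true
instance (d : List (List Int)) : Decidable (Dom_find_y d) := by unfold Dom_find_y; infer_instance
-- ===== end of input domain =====

-- B replaces A's full column-major min/max tracking pass by two early-breaking
-- directional row scans (alternative decomposition; no speed claim proved here).

-- ===== PORT A =====
-- literal transliteration of A: column-major nested loops, state (miny, maxy)
def find_y (d : List (List Int)) : Int × Int :=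
  (PySem.List.pyRange 0 (((PySem.List.pyGet? d 0).getD []).length : Int) 1).foldl
    (fun st i =>
      (PySem.List.pyRange 0 (d.length : Int) 1).foldl
        (fun st j =>
          if ((PySem.List.pyGet? ((PySem.List.pyGet? d j).getD []) i).getD 0) != 0 then
            (min st.1 j, max st.2 j)
          else st)
        st)
    ((d.length : Int), 0)

-- ===== PORT B =====
-- any(d[j][i] != 0 for i in range(w)) on a given row
def pvRowNonzero (row : List Int) (w : Int) : Bool :=
  (PySem.List.pyRange 0 w 1).any (fun i => (PySem.List.pyGet? row i).getD 0 != 0)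

-- a 'for j in js: if hit: res = j; break' loop with default dflt
def pvFirstHit (d : List (List Int)) (w : Int) (js : List Int) (dflt : Int) : Int :=
  match js with
  | [] => dflt
  | j :: rest =>
      if pvRowNonzero ((PySem.List.pyGet? d j).getD []) w then j
      else pvFirstHit d w rest dflt

def find_y_alt (d : List (List Int)) : Int × Int :=
  let w : Int := ((PySem.List.pyGet? d 0).getD []).length
  let n : Int := d.length
  let miny := pvFirstHit d w (PySem.List.pyRange 0 n 1) n
  let maxy := pvFirstHit d w (PySem.List.pyRange (n - 1) (-1) (-1)) 0
  (miny, maxy)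

-- ===== PRECONDITION & SPEC =====
-- Python A raises IndexError on the empty grid (d[0]) and on any grid with a row
-- shorter than the first row (d[j][i]); Pre_ excludes exactly those inputs.
def Pre_find_y (d : List (List Int)) : Prop :=
  d ≠ [] ∧ ∀ row ∈ d, d.headI.length ≤ row.length
instance (d : List (List Int)) : Decidable (Pre_find_y d) := by unfold Pre_find_y; infer_instance
def pvWitness_find_y : List (List Int) := [[0, 1], [2, 0]]

def Spec_find_y (d : List (List Int)) (out : Int × Int) : Prop := out = find_y_alt d
instance (d : List (List Int)) (out : Int × Int) : Decidable (Spec_find_y d out) := by unfold Spec_find_y; infer_instance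

-- ===== CLAIM (what is proved, stated in full; the proofs are below) =====
def Claim_equal_find_y : Prop := ∀ (d : List (List Int)), Dom_find_y d → Pre_find_y d → Spec_find_y d (find_y d)

-- ===== LEMMAS AND PROOFS =====

-- one pass of min/max-tracking splits into a filter and two folds
theorem pv_foldl_pair (p : Int → Bool) (js : List Int) (st : Int × Int) :
    js.foldl (fun st j => if p j then (min st.1 j, max st.2 j) else st) st
      = ((js.filter p).foldl min st.1, (js.filter p).foldl max st.2) := by
  induction js generalizing st with
  | nil => simp
  | cons j rest ih =>
      by_cases h : p j = true <;> simp [h, ih]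

-- A's whole nested fold, characterised over the flattened list of hit indices
theorem pv_A_char (c : Int → Int → Bool) (is js : List Int) (st : Int × Int) :
    is.foldl (fun st i =>
        js.foldl (fun st j => if c j i then (min st.1 j, max st.2 j) else st) st) st
      = ((is.flatMap (fun i => js.filter (fun j => c j i))).foldl min st.1,
         (is.flatMap (fun i => js.filter (fun j => c j i))).foldl max st.2) := by
  induction is generalizing st with
  | nil => simp
  | cons i rest ih =>
      simp only [List.foldl_cons, List.flatMap_cons, List.foldl_append]
      rw [pv_foldl_pair, ih]

theorem pv_fmin_le_init (l : List Int) (a : Int) : l.foldl min a ≤ a := by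
  induction l generalizing a with
  | nil => simp
  | cons x rest ih =>
      simp only [List.foldl_cons]
      exact le_trans (ih (min a x)) (min_le_left a x)

theorem pv_fmin_le_mem (l : List Int) (a x : Int) (hx : x ∈ l) : l.foldl min a ≤ x := by
  induction l generalizing a with
  | nil => cases hx
  | cons y rest ih =>
      simp only [List.foldl_cons]
      rcases List.mem_cons.mp hx with h | h
      · exact le_trans (pv_fmin_le_init rest (min a y)) (h ▸ min_le_right a y)
      · exact ih (min a y) h

theorem pv_fmin_cases (l : List Int) (a : Int) : l.foldl min a = a ∨ l.foldl min a ∈ l := by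
  induction l generalizing a with
  | nil => simp
  | cons x rest ih =>
      simp only [List.foldl_cons]
      rcases ih (min a x) with h | h
      · rcases min_choice a x with hm | hm
        · exact Or.inl (h.trans hm)
        · exact Or.inr (List.mem_cons.mpr (Or.inl (h.trans hm)))
      · exact Or.inr (List.mem_cons.mpr (Or.inr h))

theorem pv_fmax_ge_init (l : List Int) (a : Int) : a ≤ l.foldl max a := by
  induction l generalizing a with
  | nil => simp
  | cons x rest ih =>
      simp only [List.foldl_cons]
      exact le_trans (le_max_left a x) (ih (max a x))

theorem pv_fmax_ge_mem (l : List Int) (a x : Int) (hx : x ∈ l) : x ≤ l.foldl max a := by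
  induction l generalizing a with
  | nil => cases hx
  | cons y rest ih =>
      simp only [List.foldl_cons]
      rcases List.mem_cons.mp hx with h | h
      · exact le_trans (h ▸ le_max_right a y) (pv_fmax_ge_init rest (max a y))
      · exact ih (max a y) h

theorem pv_fmax_cases (l : List Int) (a : Int) : l.foldl max a = a ∨ l.foldl max a ∈ l := by
  induction l generalizing a with
  | nil => simp
  | cons x rest ih =>
      simp only [List.foldl_cons]
      rcases ih (max a x) with h | h
      · rcases max_choice a x with hm | hm
        · exact Or.inl (h.trans hm)
        · exact Or.inr (List.mem_cons.mpr (Or.inl (h.trans hm)))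
      · exact Or.inr (List.mem_cons.mpr (Or.inr h))

-- firstHit lemmas; p j abbreviates the row test on row j
theorem pv_fh_none (d : List (List Int)) (w : Int) (js : List Int) (dflt : Int)
    (h : ∀ j ∈ js, ¬ pvRowNonzero ((PySem.List.pyGet? d j).getD []) w = true) :
    pvFirstHit d w js dflt = dflt := by
  induction js with
  | nil => rfl
  | cons j rest ih =>
      have hj := h j (List.mem_cons_self)
      simp only [pvFirstHit, if_neg hj]
      exact ih (fun x hx => h x (List.mem_cons_of_mem _ hx))

theorem pv_fh_hit (d : List (List Int)) (w : Int) (js : List Int) (dflt : Int)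
    (h : ∃ j ∈ js, pvRowNonzero ((PySem.List.pyGet? d j).getD []) w = true) :
    pvFirstHit d w js dflt ∈ js ∧
      pvRowNonzero ((PySem.List.pyGet? d (pvFirstHit d w js dflt)).getD []) w = true := by
  induction js with
  | nil => obtain ⟨j, hj, _⟩ := h; cases hj
  | cons j rest ih =>
      by_cases hj : pvRowNonzero ((PySem.List.pyGet? d j).getD []) w = true
      · simp only [pvFirstHit, if_pos hj]
        exact ⟨List.mem_cons_self, hj⟩
      · simp only [pvFirstHit, if_neg hj]
        have h' : ∃ x ∈ rest, pvRowNonzero ((PySem.List.pyGet? d x).getD []) w = true := by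
          obtain ⟨x, hx, hpx⟩ := h
          rcases List.mem_cons.mp hx with rfl | hx'
          · exact absurd hpx hj
          · exact ⟨x, hx', hpx⟩
        obtain ⟨h1, h2⟩ := ih h'
        exact ⟨List.mem_cons_of_mem _ h1, h2⟩

theorem pv_fh_min (d : List (List Int)) (w : Int) (js : List Int) (dflt : Int)
    (hs : js.Pairwise (· ≤ ·)) (j : Int) (hj : j ∈ js)
    (hp : pvRowNonzero ((PySem.List.pyGet? d j).getD []) w = true) :
    pvFirstHit d w js dflt ≤ j := by
  induction js with
  | nil => cases hj
  | cons x rest ih =>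
      by_cases hx : pvRowNonzero ((PySem.List.pyGet? d x).getD []) w = true
      · simp only [pvFirstHit, if_pos hx]
        rcases List.mem_cons.mp hj with rfl | hj'
        · exact le_refl _
        · exact (List.pairwise_cons.mp hs).1 j hj'
      · simp only [pvFirstHit, if_neg hx]
        rcases List.mem_cons.mp hj with rfl | hj'
        · exact absurd hp hx
        · exact ih (List.pairwise_cons.mp hs).2 hj'

theorem pv_fh_max (d : List (List Int)) (w : Int) (js : List Int) (dflt : Int)
    (hs : js.Pairwise (· ≥ ·)) (j : Int) (hj : j ∈ js)
    (hp : pvRowNonzero ((PySem.List.pyGet? d j).getD []) w = true) :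
    j ≤ pvFirstHit d w js dflt := by
  induction js with
  | nil => cases hj
  | cons x rest ih =>
      by_cases hx : pvRowNonzero ((PySem.List.pyGet? d x).getD []) w = true
      · simp only [pvFirstHit, if_pos hx]
        rcases List.mem_cons.mp hj with rfl | hj'
        · exact le_refl _
        · exact (List.pairwise_cons.mp hs).1 j hj'
      · simp only [pvFirstHit, if_neg hx]
        rcases List.mem_cons.mp hj with rfl | hj'
        · exact absurd hp hx
        · exact ih (List.pairwise_cons.mp hs).2 hj'

-- the cell test shared by both characterisations
def pvC (d : List (List Int)) (j i : Int) : Bool :=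
  ((PySem.List.pyGet? ((PySem.List.pyGet? d j).getD []) i).getD 0) != 0

theorem pv_rowNonzero_eq_any (d : List (List Int)) (w j : Int) :
    pvRowNonzero ((PySem.List.pyGet? d j).getD []) w
      = (PySem.List.pyRange 0 w 1).any (fun i => pvC d j i) := rfl

theorem pv_mem_L (d : List (List Int)) (w : Int) (is js : List Int) (j : Int) :
    (j ∈ is.flatMap (fun i => js.filter (fun j => pvC d j i))) ↔
      (j ∈ js ∧ is.any (fun i => pvC d j i) = true) := by
  simp [List.mem_flatMap, List.mem_filter, List.any_eq_true]
  tauto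

-- miny agreement
theorem pv_min_eq (d : List (List Int)) :
    ((PySem.List.pyRange 0 (((PySem.List.pyGet? d 0).getD []).length : Int) 1).flatMap
        (fun i => (PySem.List.pyRange 0 (d.length : Int) 1).filter (fun j => pvC d j i))).foldl
        min (d.length : Int)
      = pvFirstHit d (((PySem.List.pyGet? d 0).getD []).length : Int)
          (PySem.List.pyRange 0 (d.length : Int) 1) (d.length : Int) := by
  set w : Int := (((PySem.List.pyGet? d 0).getD []).length : Int) with hw
  set n : Int := (d.length : Int) with hn
  set is := PySem.List.pyRange 0 w 1 with his
  set js := PySem.List.pyRange 0 n 1 with hjs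
  set L := is.flatMap (fun i => js.filter (fun j => pvC d j i)) with hL
  have hmem : ∀ j, j ∈ L ↔ (j ∈ js ∧ is.any (fun i => pvC d j i) = true) := by
    intro j; exact pv_mem_L d w is js j
  have hp : ∀ j, pvRowNonzero ((PySem.List.pyGet? d j).getD []) w
      = is.any (fun i => pvC d j i) := fun j => pv_rowNonzero_eq_any d w j
  by_cases hex : ∃ j ∈ js, pvRowNonzero ((PySem.List.pyGet? d j).getD []) w = true
  · obtain ⟨hr1, hr2⟩ := pv_fh_hit d w js n hex
    set r := pvFirstHit d w js n with hrdef
    have hrL : r ∈ L := (hmem r).mpr ⟨hr1, (hp r) ▸ hr2⟩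
    have h1 : L.foldl min n ≤ r := pv_fmin_le_mem L n r hrL
    rcases pv_fmin_cases L n with hc | hc
    · -- fold = n, but r < n since r ∈ js
      have : r < n := ((PySem.List.mem_pyRange_one).mp hr1).2
      omega
    · -- fold ∈ L, so it is a hit index, and r is the least hit
      obtain ⟨hm1, hm2⟩ := (hmem _).mp hc
      have hsort : js.Pairwise (· ≤ ·) :=
        (PySem.List.pairwise_lt_pyRange_one 0 n).imp (fun h => le_of_lt h)
      have h2 : r ≤ L.foldl min n :=
        pv_fh_min d w js n hsort _ hm1 ((hp _) ▸ hm2)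
      omega
  · have hL0 : L = [] := by
      apply List.eq_nil_iff_forall_not_mem.mpr
      intro j hjL
      obtain ⟨h1, h2⟩ := (hmem j).mp hjL
      exact hex ⟨j, h1, (hp j) ▸ h2⟩
    rw [hL0]
    exact (pv_fh_none d w js n (fun j hj hpj => hex ⟨j, hj, hpj⟩)).symm

-- maxy agreement
theorem pv_max_eq (d : List (List Int)) :
    ((PySem.List.pyRange 0 (((PySem.List.pyGet? d 0).getD []).length : Int) 1).flatMap
        (fun i => (PySem.List.pyRange 0 (d.length : Int) 1).filter (fun j => pvC d j i))).foldl
        max 0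
      = pvFirstHit d (((PySem.List.pyGet? d 0).getD []).length : Int)
          (PySem.List.pyRange ((d.length : Int) - 1) (-1) (-1)) 0 := by
  set w : Int := (((PySem.List.pyGet? d 0).getD []).length : Int) with hw
  set n : Int := (d.length : Int) with hn
  set is := PySem.List.pyRange 0 w 1 with his
  set js := PySem.List.pyRange 0 n 1 with hjs
  set js' := PySem.List.pyRange (n - 1) (-1) (-1) with hjs'
  set L := is.flatMap (fun i => js.filter (fun j => pvC d j i)) with hL
  have hmem : ∀ j, j ∈ L ↔ (j ∈ js ∧ is.any (fun i => pvC d j i) = true) := by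
    intro j; exact pv_mem_L d w is js j
  have hp : ∀ j, pvRowNonzero ((PySem.List.pyGet? d j).getD []) w
      = is.any (fun i => pvC d j i) := fun j => pv_rowNonzero_eq_any d w j
  have hjseq : ∀ j : Int, j ∈ js' ↔ j ∈ js := by
    intro j
    rw [hjs', hjs, PySem.List.mem_pyRange_neg_one, PySem.List.mem_pyRange_one]
    omega
  by_cases hex : ∃ j ∈ js', pvRowNonzero ((PySem.List.pyGet? d j).getD []) w = true
  · obtain ⟨hr1, hr2⟩ := pv_fh_hit d w js' 0 hex
    set r := pvFirstHit d w js' 0 with hrdef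
    have hrL : r ∈ L := (hmem r).mpr ⟨(hjseq r).mp hr1, (hp r) ▸ hr2⟩
    have h1 : r ≤ L.foldl max 0 := pv_fmax_ge_mem L 0 r hrL
    rcases pv_fmax_cases L 0 with hc | hc
    · -- fold = 0 ≤ r (r ∈ js means 0 ≤ r), so both equal
      have : 0 ≤ r := ((PySem.List.mem_pyRange_one).mp ((hjseq r).mp hr1)).1
      omega
    · obtain ⟨hm1, hm2⟩ := (hmem _).mp hc
      have hsort : js'.Pairwise (· ≥ ·) := by
        rw [hjs', PySem.List.pyRange_neg_one_eq_reverse]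
        rw [List.pairwise_reverse]
        have : (n - 1) + 1 = n := by omega
        rw [this]
        exact (PySem.List.pairwise_lt_pyRange_one ((-1) + 1) n).imp (fun h => le_of_lt h)
      have h2 : L.foldl max 0 ≤ r :=
        pv_fh_max d w js' 0 hsort _ ((hjseq _).mpr hm1) ((hp _) ▸ hm2)
      omega
  · have hL0 : L = [] := by
      apply List.eq_nil_iff_forall_not_mem.mpr
      intro j hjL
      obtain ⟨h1, h2⟩ := (hmem j).mp hjL
      exact hex ⟨j, (hjseq j).mpr h1, (hp j) ▸ h2⟩
    rw [hL0]
    exact (pv_fh_none d w js' 0 (fun j hj hpj => hex ⟨j, hj, hpj⟩)).symm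

-- the equivalence in fact holds for every d (the ports total A's raising cases
-- with the PySem defaults); the Pre_-restricted claim follows
theorem pv_main (d : List (List Int)) : find_y d = find_y_alt d := by
  unfold find_y find_y_alt
  rw [pv_A_char (fun j i =>
    ((PySem.List.pyGet? ((PySem.List.pyGet? d j).getD []) i).getD 0) != 0)]
  exact Prod.ext (pv_min_eq d) (pv_max_eq d)

-- ===== VERDICT (by name: the statement is the Claim_ definition above) =====
theorem find_y_spec : Claim_equal_find_y := by
  intro d _ _
  unfold Spec_find_y
  exact pv_main d
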